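-- pv_equiv track=rewrite | github.com/endomorphosis/ipfs_datasets_py | ipfs_datasets_py/processors/legal_data/email_workspace.py | _merge_terms
-- ===== SOURCE A (Python) =====
-- from collections import Counter
-- from typing import Any, Iterable, Sequence
--
-- def _merge_terms(manifests: list[dict[str, Any]]) -> list[str]:
--     counts: Counter[str] = Counter()
--     for manifest in manifests:
--         for term in list(manifest.get("complaint_terms") or []):
--             cleaned = str(term or "").strip().lower()
--             if cleaned:
--                 counts[cleaned] += 1
--     return [term for term, _count in counts.most_common()]
-- ===== SOURCE B (Python) =====
-- def _merge_terms(manifests):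
--     cleaned = [c for m in manifests
--                  for c in (str(t or "").strip().lower() for t in (m.get("complaint_terms") or []))
--                  if c]
--     counts = {}
--     for c in cleaned:
--         counts[c] = counts.get(c, 0) + 1
--     if not counts:
--         return []
--     maxc = max(counts.values())
--     buckets = [[] for _ in range(maxc + 1)]
--     for term, n in counts.items():
--         buckets[n].append(term)
--     out = []
--     for b in reversed(buckets):
--         out += b
--     return out
-- ===== Notes on version B (the rewrite author's own statement) =====
-- stated objective: alternative
-- what changed: Counter.most_common's comparison sort is replaced by a counting/bucket sort over frequencies (buckets indexed by count, concatenated from the highest count down), and the counts are built from one flattened comprehension instead of A's nested counting loops.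
import Mathlib
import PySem

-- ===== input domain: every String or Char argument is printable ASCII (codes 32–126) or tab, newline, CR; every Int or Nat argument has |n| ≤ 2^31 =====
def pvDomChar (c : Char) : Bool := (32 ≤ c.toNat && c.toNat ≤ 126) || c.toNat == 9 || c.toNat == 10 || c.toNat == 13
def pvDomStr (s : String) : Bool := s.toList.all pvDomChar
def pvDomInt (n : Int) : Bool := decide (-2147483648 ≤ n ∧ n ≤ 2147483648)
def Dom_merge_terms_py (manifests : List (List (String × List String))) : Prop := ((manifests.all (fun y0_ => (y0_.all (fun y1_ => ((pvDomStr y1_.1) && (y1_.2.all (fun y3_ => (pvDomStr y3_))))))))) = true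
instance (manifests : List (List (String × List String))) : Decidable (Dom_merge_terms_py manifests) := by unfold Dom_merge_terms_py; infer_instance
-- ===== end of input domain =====

-- B replaces Counter.most_common's comparison sort by a linear bucket pass over frequencies
-- (and builds the counts from one flattened comprehension instead of A's nested counting loops).

-- ===== PORT A =====
-- shared tiny expressions of both Pythons: 'list(m.get("complaint_terms") or [])'
-- and 'str(t or "").strip().lower()' (both Source B and A contain them verbatim)
def pvComplaintTerms (m : List (String × List String)) : List String :=
  match (m.find? (fun p => p.1 == "complaint_terms")).map (fun p => p.2) with
  | none => []
  | some v => if v == [] then [] else v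

def pvCleanTerm (t : String) : String :=
  PySem.Str.lower (PySem.Str.strip (if t == "" then "" else t))

def merge_terms_py (manifests : List (List (String × List String))) : List String :=
  let counts : PySem.Dict String Int := manifests.foldl (fun counts manifest =>
      (pvComplaintTerms manifest).foldl (fun counts term =>
        let cleaned := pvCleanTerm term
        if cleaned ≠ "" then counts.insert cleaned (counts.getD cleaned 0 + 1) else counts) counts)
    PySem.Dict.empty
  -- counts.most_common() = sorted(items, key=itemgetter(1), reverse=True)
  (PySem.List.sorted counts.items (fun p => p.2) true).map (fun p => p.1)

-- ===== PORT B =====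
def merge_terms_py_alt (manifests : List (List (String × List String))) : List String :=
  -- flattened comprehension of the cleaned non-empty terms
  let cleaned : List String := manifests.flatMap (fun m =>
      ((pvComplaintTerms m).map (fun t => pvCleanTerm t)).filter (fun c => c ≠ ""))
  let counts : PySem.Dict String Int :=
    cleaned.foldl (fun d c => d.insert c (d.getD c 0 + 1)) PySem.Dict.empty
  if counts.items.isEmpty then [] else
  let maxc : Int := match counts.values with | [] => 0 | v :: t => t.foldl max v
  let buckets : List (List String) := counts.items.foldl
      (fun bs p => bs.modify p.2.toNat (fun b => b ++ [p.1]))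
      (List.replicate (maxc.toNat + 1) [])
  buckets.reverse.foldl (fun out b => out ++ b) []

-- ===== PRECONDITION & SPEC =====
def Spec_merge_terms_py (manifests : List (List (String × List String))) (out : List String) : Prop := out = merge_terms_py_alt manifests
instance (manifests : List (List (String × List String))) (out : List String) : Decidable (Spec_merge_terms_py manifests out) := by unfold Spec_merge_terms_py; infer_instance

-- ===== CLAIM (what is proved, stated in full; the proofs are below) =====
def Claim_equal_merge_terms_py : Prop := ∀ (manifests : List (List (String × List String))), Dom_merge_terms_py manifests → Spec_merge_terms_py manifests (merge_terms_py manifests)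

-- ===== LEMMAS AND PROOFS =====

theorem mt_insertBy_append {α : Type} (bef : α → α → Bool) (x : α) (as bs : List α)
    (h : ∀ y ∈ as, bef x y = false) :
    PySem.List.insertBy bef x (as ++ bs) = as ++ PySem.List.insertBy bef x bs := by
  induction as with
  | nil => rfl
  | cons a as ih =>
      have ha : bef x a = false := h a (by simp)
      simp [PySem.List.insertBy, ha, ih (fun y hy => h y (by simp [hy]))]

-- inserting x (stably, reverse order by key) into buckets laid out by strictly descending key
-- puts x at the end of its own bucket
theorem mt_insertBy_flatMap {α : Type} (key : α → Int) (vs : List Int)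
    (hvs : vs.Pairwise (fun a b => b < a)) (x : α) (hx : key x ∈ vs)
    (F : Int → List α) (hF : ∀ c ∈ vs, ∀ p ∈ F c, key p = c) :
    PySem.List.insertBy (fun a b => decide (key b < key a)) x (vs.flatMap F)
      = vs.flatMap (fun c => F c ++ if key x == c then [x] else []) := by
  induction vs with
  | nil => simp at hx
  | cons c rest ih =>
      have hrest : ∀ c' ∈ rest, c' < c := by
        intro c' hc'; exact (List.pairwise_cons.mp hvs).1 c' hc'
      have hvs' : rest.Pairwise (fun a b => b < a) := (List.pairwise_cons.mp hvs).2
      have hskip : ∀ y ∈ F c, (fun a b => decide (key b < key a)) x y = false := by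
        intro y hy
        have : key y = c := hF c (by simp) y hy
        by_cases hxc : key x = c
        · simp [this, hxc]
        · have hxr : key x ∈ rest := (List.mem_cons.mp hx).resolve_left hxc
          have h1 : key x < c := hrest _ hxr
          simp only [decide_eq_false_iff_not, not_lt, this]
          omega
      simp only [List.flatMap_cons]
      rw [mt_insertBy_append _ _ _ _ hskip]
      by_cases hxc : key x = c
      · have hrestF : rest.flatMap (fun c' => F c' ++ if key x == c' then [x] else [])
            = rest.flatMap F := by
          apply List.flatMap_congr
          intro c' hc'
          have : key x ≠ c' := by have := hrest c' hc'; omega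
          simp [this]
        have hins : PySem.List.insertBy (fun a b => decide (key b < key a)) x (rest.flatMap F)
            = x :: rest.flatMap F := by
          cases hflat : rest.flatMap F with
          | nil => rfl
          | cons y t =>
              have hy : y ∈ rest.flatMap F := by rw [hflat]; simp
              rcases List.mem_flatMap.mp hy with ⟨c', hc', hyF⟩
              have hlt : key y < key x := by
                have hk := hF c' (by simp [hc']) y hyF
                rw [hk, hxc]; exact hrest c' hc'
              simp [PySem.List.insertBy, hlt]
        rw [hins, hrestF]
        simp [hxc]
      · have hxr : key x ∈ rest := (List.mem_cons.mp hx).resolve_left hxc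
        have hne : (key x == c) = false := by simp [hxc]
        rw [ih hvs' hxr (fun c' hc' p hp => hF c' (by simp [hc']) p hp)]
        simp [hne]

-- the stable reverse sort by key is the concatenation of the key-buckets,
-- taken in strictly descending key order
theorem mt_sorted_rev_eq_flatMap {α : Type} (key : α → Int) (vs : List Int)
    (hvs : vs.Pairwise (fun a b => b < a)) :
    ∀ (l : List α), (∀ p ∈ l, key p ∈ vs) →
    PySem.List.sorted l key true = vs.flatMap (fun c => l.filter (fun p => key p == c)) := by
  intro l
  induction l using List.reverseRecOn with
  | nil => intro _; simp [PySem.List.sorted_rev_eq_foldl_insertBy]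
  | append_singleton l x ih =>
      intro hmem
      have hl : ∀ p ∈ l, key p ∈ vs := fun p hp => hmem p (by simp [hp])
      have hx : key x ∈ vs := hmem x (by simp)
      rw [PySem.List.sorted_rev_eq_foldl_insertBy, List.foldl_append]
      simp only [List.foldl_cons, List.foldl_nil]
      rw [← PySem.List.sorted_rev_eq_foldl_insertBy, ih hl]
      rw [mt_insertBy_flatMap key vs hvs x hx _
        (fun c _ p hp => by simpa using (List.mem_filter.mp hp).2)]
      apply List.flatMap_congr
      intro c hc
      by_cases h : key x = c <;> simp [List.filter_append, h]

-- the bucket-building fold, elementwise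
theorem mt_buckets_foldl {α : Type} (l : List (α × Int)) (bs : List (List α))
    (h : ∀ p ∈ l, p.2.toNat < bs.length) :
    l.foldl (fun bs p => bs.modify p.2.toNat (fun b => b ++ [p.1])) bs
      = bs.mapIdx (fun j b => b ++ (l.filter (fun p => p.2.toNat == j)).map (fun p => p.1)) := by
  induction l generalizing bs with
  | nil =>
      apply List.ext_getElem (by simp)
      intro j hj hj'
      simp
  | cons p l ih =>
      simp only [List.foldl_cons]
      rw [ih _ (by intro q hq; simpa using h q (by simp [hq]))]
      apply List.ext_getElem (by simp)
      intro j hj hj'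
      simp only [List.getElem_mapIdx]
      by_cases hjp : p.2.toNat = j
      · simp [hjp]
      · simp [hjp]

-- concatenating the reversed buckets = descending flatMap of the per-count buckets
theorem mt_alt_tail (I : List (String × Int)) (n : Nat)
    (hidx : ∀ p ∈ I, p.2.toNat < n) :
    (I.foldl (fun bs p => bs.modify p.2.toNat (fun b => b ++ [p.1]))
        (List.replicate n [])).reverse.foldl (fun out b => out ++ b) []
      = (List.range n).reverse.flatMap
          (fun j => (I.filter (fun p => p.2.toNat == j)).map (fun p => p.1)) := by
  rw [mt_buckets_foldl I _ (by simpa using hidx)]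
  rw [PySem.List.foldl_append_eq_flatten]
  have hrep : (List.replicate n ([]:List String)).mapIdx
      (fun j b => b ++ (I.filter (fun p => p.2.toNat == j)).map (fun p => p.1))
      = (List.range n).map (fun j => (I.filter (fun p => p.2.toNat == j)).map (fun p => p.1)) := by
    apply List.ext_getElem (by simp)
    intro j hj hj'
    simp [List.getElem_mapIdx]
  rw [hrep, ← List.map_reverse, List.flatMap_def, List.nil_append]

theorem merge_terms_py_eq_alt (manifests : List (List (String × List String))) :
    merge_terms_py manifests = merge_terms_py_alt manifests := by
  simp only [merge_terms_py, merge_terms_py_alt]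
  -- both counting loops build Counter(cleaned)
  have hA : manifests.foldl (fun counts manifest =>
        (pvComplaintTerms manifest).foldl (fun counts term =>
          if pvCleanTerm term ≠ "" then
            counts.insert (pvCleanTerm term) (counts.getD (pvCleanTerm term) 0 + 1)
          else counts) counts) (PySem.Dict.empty : PySem.Dict String Int)
      = (manifests.flatMap (fun m =>
          ((pvComplaintTerms m).map (fun t => pvCleanTerm t)).filter
            (fun c => decide (c ≠ "")))).foldl
          (fun d c => d.insert c (d.getD c 0 + 1)) (PySem.Dict.empty : PySem.Dict String Int) := by
    rw [List.foldl_flatMap]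
    apply PySem.List.foldl_congr_mem
    intro d m _
    rw [← List.foldl_map (f := fun t => pvCleanTerm t)
        (g := fun (d : PySem.Dict String Int) c =>
          if c ≠ "" then d.insert c (d.getD c 0 + 1) else d),
      PySem.List.foldl_ite_eq_foldl_filter (fun c => c ≠ "")
        (fun (d : PySem.Dict String Int) c => d.insert c (d.getD c 0 + 1))]
  rw [hA, PySem.Dict.foldl_insert_getD_add_one_eq_counter]
  set cl := manifests.flatMap (fun m =>
      ((pvComplaintTerms m).map (fun t => pvCleanTerm t)).filter (fun c => decide (c ≠ "")))
    with hcl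
  have hI := PySem.Dict.items_counter cl
  set I := (PySem.Dict.counter cl).items with hIdef
  by_cases hnil : I = []
  · simp [hnil, PySem.List.sorted_rev_eq_foldl_insertBy]
  · -- the nonempty case
    have hpos : ∀ p ∈ I, 1 ≤ p.2 := by
      intro p hp
      rw [hI] at hp
      rcases List.mem_map.mp hp with ⟨k, hk, rfl⟩
      have : k ∈ cl := (PySem.Set.mem_ofList cl k).mp hk
      have := List.count_pos_iff.mpr this
      simp; omega
    simp only [List.isEmpty_iff, hnil, if_false]
    rcases hIc : I with _ | ⟨p, ps⟩
    · exact absurd hIc hnil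
    · -- maxc and its properties
      simp only [PySem.Dict.values, ← hIdef, hIc, List.map_cons]
      set maxc := (ps.map (fun x => x.2)).foldl max p.2 with hmaxc
      have hle : ∀ q ∈ I, q.2 ≤ maxc := by
        intro q hq
        rw [hIc] at hq
        rcases List.mem_cons.mp hq with rfl | hq
        · exact (PySem.List.le_foldl_max _ _).1
        · exact (PySem.List.le_foldl_max (ps.map (fun x => x.2)) p.2).2 q.2
            (List.mem_map.mpr ⟨q, hq, rfl⟩)
      have hmaxpos : 1 ≤ maxc := le_trans (hpos p (by rw [hIc]; simp))
        ((PySem.List.le_foldl_max _ _).1)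
      have hidx : ∀ q ∈ I, q.2.toNat < maxc.toNat + 1 := by
        intro q hq
        have h1 := hpos q (hIc.symm ▸ hq)
        have h2 := hle q hq
        omega
      rw [mt_alt_tail (p :: ps) (maxc.toNat + 1) (hIc ▸ hidx)]
      -- the A side: stable reverse sort = descending buckets
      have hvs : (List.map (fun (j : Nat) => (j : Int)) (List.range (maxc.toNat + 1)).reverse).Pairwise
          (fun a b => b < a) := by
        refine List.Pairwise.map (fun (j : Nat) => (j : Int)) (fun a b h => ?_)
          (List.pairwise_reverse.mpr List.pairwise_lt_range)
        simpa using h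
      have hmem : ∀ q ∈ I, q.2 ∈ List.map (fun (j : Nat) => (j : Int))
          (List.range (maxc.toNat + 1)).reverse := by
        intro q hq
        refine List.mem_map.mpr ⟨q.2.toNat, ?_, ?_⟩
        · rw [List.mem_reverse, List.mem_range]
          exact hidx q hq
        · have := hpos q hq; omega
      rw [mt_sorted_rev_eq_flatMap (fun p => p.2) _ hvs (p :: ps) (hIc ▸ hmem)]
      rw [List.map_flatMap, List.flatMap_map]
      apply List.flatMap_congr
      intro j hj
      congr 1
      apply List.filter_congr
      intro q hq
      have h1 := hpos q (hIc.symm ▸ hq)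
      by_cases h : q.2 = (j : Int)
      · simp [h]
      · simp [h]
        omega

-- ===== VERDICT (by name: the statement is the Claim_ definition above) =====
theorem merge_terms_py_spec : Claim_equal_merge_terms_py := by
  intro manifests _
  unfold Spec_merge_terms_py
  exact merge_terms_py_eq_alt manifests
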